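-- pv_equiv track=rewrite | github.com/WncFht/GRec_public | index/generate_indices.py | get_collision_item
-- ===== SOURCE A (Python) =====
-- def get_collision_item(all_indices_str):
--     """
--     获取所有发生碰撞的项目的分组。
--
--     参数:
--         all_indices_str: 包含所有索引字符串的 NumPy 数组。
--
--     返回:
--         list: 列表中的每个元素是一个列表，包含发生碰撞的项目索引。
--     """
--     index2id = {}  # 字典，用于存储索引到项目ID的映射
--     for i, index in enumerate(all_indices_str):
--         if index not in index2id:
--             index2id[index] = []
--         index2id[index].append(i)  # 将项目ID添加到对应索引的列表中
--
--     # 只保留有冲突的item（即出现次数大于1的索引）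
--     collision_item_groups = [
--         index2id[index] for index in index2id if len(index2id[index]) > 1
--     ]
--     return collision_item_groups
-- ===== SOURCE B (Python) =====
-- def get_collision_item(all_indices_str):
--     # Brute force, no dictionary: scan positions left to right; at each first
--     # occurrence of an index string, collect all its positions by a full scan.
--     xs = list(all_indices_str)
--     n = len(xs)
--     groups = []
--     for i in range(n):
--         if xs[i] in xs[:i]:
--             continue  # not the first occurrence of this index string
--         positions = [j for j in range(n) if xs[j] == xs[i]]
--         if len(positions) > 1:
--             groups.append(positions)
--     return groups
-- ===== Notes on version B (the rewrite author's own statement) =====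
-- stated objective: alternative
-- what changed: Drops A's dict-of-lists grouping entirely: B scans positions left to right, detects first occurrences by a membership test in the prefix, and gathers each colliding group by a full inner scan (quadratic nested scans instead of a hash index).
import Mathlib
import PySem

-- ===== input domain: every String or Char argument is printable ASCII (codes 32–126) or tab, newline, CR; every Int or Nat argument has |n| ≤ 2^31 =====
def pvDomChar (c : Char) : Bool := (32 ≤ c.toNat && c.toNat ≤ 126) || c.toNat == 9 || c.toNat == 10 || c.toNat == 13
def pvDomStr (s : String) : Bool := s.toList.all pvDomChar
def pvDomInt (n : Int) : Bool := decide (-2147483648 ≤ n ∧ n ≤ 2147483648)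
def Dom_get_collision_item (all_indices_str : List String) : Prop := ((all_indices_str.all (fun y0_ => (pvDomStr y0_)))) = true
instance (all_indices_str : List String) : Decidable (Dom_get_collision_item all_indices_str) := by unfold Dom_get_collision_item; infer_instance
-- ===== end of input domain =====

-- B drops A's dict-of-lists grouping: it scans positions left to right, detects first
-- occurrences by a prefix-membership test, and gathers each colliding group by a full
-- inner scan — nested scans with no dictionary; not claimed faster.

-- ===== PORT A =====
-- loop body of A: 'if index not in index2id: index2id[index] = []' then 'index2id[index].append(i)'
def collideStep (d : PySem.Dict String (List Int)) (p : Int × String) : PySem.Dict String (List Int) :=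
  let d' := if d.contains p.2 = false then d.insert p.2 ([] : List Int) else d
  d'.insert p.2 (d'.getD p.2 [] ++ [p.1])

def get_collision_item (all_indices_str : List String) : List (List Int) :=
  let index2id := (PySem.List.enumerate all_indices_str 0).foldl collideStep PySem.Dict.empty
  (index2id.keys.filter (fun k => (index2id.getD k []).length > 1)).map
    (fun k => index2id.getD k [])

-- ===== PORT B =====
-- '[j for j in range(n) if xs[j] == xs[i]]'
def firstGroup (xs : List String) (i : Int) : List Int :=
  (PySem.List.pyRange 0 (PySem.List.len xs) 1).filter
    (fun j => PySem.List.pyGetD xs j "" == PySem.List.pyGetD xs i "")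

def get_collision_item_alt (all_indices_str : List String) : List (List Int) :=
  (PySem.List.pyRange 0 (PySem.List.len all_indices_str) 1).foldl
    (fun groups i =>
      if (PySem.List.slice all_indices_str none (some i)).contains
          (PySem.List.pyGetD all_indices_str i "") then groups   -- 'continue'
      else
        let positions := firstGroup all_indices_str i
        if positions.length > 1 then groups ++ [positions] else groups)
    []

-- ===== PRECONDITION & SPEC =====
def Spec_get_collision_item (all_indices_str : List String) (out : List (List Int)) : Prop := out = get_collision_item_alt all_indices_str
instance (all_indices_str : List String) (out : List (List Int)) : Decidable (Spec_get_collision_item all_indices_str out) := by unfold Spec_get_collision_item; infer_instance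

-- ===== CLAIM (what is proved, stated in full; the proofs are below) =====
def Claim_equal_get_collision_item : Prop := ∀ (all_indices_str : List String), Dom_get_collision_item all_indices_str → Spec_get_collision_item all_indices_str (get_collision_item all_indices_str)

-- ===== LEMMAS AND PROOFS =====

-- the group of a key: all positions holding it, in order
def groupOf (xs : List String) (k : String) : List Int :=
  ((PySem.List.enumerate xs 0).filter (fun p => p.2 == k)).map (·.1)

-- A side: getD / keys of A's grouping fold
lemma getD_collideStep (d : PySem.Dict String (List Int)) (p : Int × String) (k : String) :
    (collideStep d p).getD k [] = d.getD k [] ++ (if p.2 == k then [p.1] else []) := by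
  unfold collideStep
  by_cases hk : k = p.2
  · subst hk
    by_cases hc : d.contains p.2 = false
    · rw [if_pos hc, PySem.Dict.getD_insert_self, PySem.Dict.getD_insert_self,
        PySem.Dict.getD_of_not_contains d [] hc]
      simp
    · rw [if_neg hc, PySem.Dict.getD_insert_self]
      simp
  · have hk2 : (p.2 == k) = false := by simp [Ne.symm hk]
    by_cases hc : d.contains p.2 = false
    · rw [if_pos hc, PySem.Dict.getD_insert_of_ne _ _ _ hk, PySem.Dict.getD_insert_of_ne _ _ _ hk]
      simp [hk2]
    · rw [if_neg hc, PySem.Dict.getD_insert_of_ne _ _ _ hk]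
      simp [hk2]

lemma getD_collide_fold (l : List (Int × String)) (d : PySem.Dict String (List Int)) (k : String) :
    (l.foldl collideStep d).getD k [] =
      d.getD k [] ++ (l.filter (fun p => p.2 == k)).map (·.1) := by
  induction l generalizing d with
  | nil => simp
  | cons p l ih =>
    simp only [List.foldl_cons, List.filter_cons]
    rw [ih, getD_collideStep]
    by_cases h : p.2 == k <;> simp [h]

lemma keys_collideStep (d : PySem.Dict String (List Int)) (p : Int × String) :
    (collideStep d p).keys = PySem.Set.add d.keys p.2 := by
  unfold collideStep
  by_cases hc : d.contains p.2 = false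
  · have hm : p.2 ∉ d.keys := fun h => by
      simp [(PySem.Dict.contains_iff_mem_keys d p.2).mpr h] at hc
    rw [if_pos hc,
      PySem.Dict.keys_insert_of_contains _ _ (PySem.Dict.contains_insert_self d p.2 []),
      PySem.Dict.keys_insert_of_not_contains d [] hc, PySem.Set.add_of_not_mem hm]
  · have hc' : d.contains p.2 = true := by simpa using hc
    have hm : p.2 ∈ d.keys := (PySem.Dict.contains_iff_mem_keys d p.2).mp hc'
    rw [if_neg hc, PySem.Dict.keys_insert_of_contains _ _ hc', PySem.Set.add_of_mem hm]

lemma keys_collide_fold (l : List (Int × String)) (d : PySem.Dict String (List Int)) :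
    (l.foldl collideStep d).keys = PySem.Set.update d.keys (l.map (·.2)) := by
  induction l generalizing d with
  | nil => simp [PySem.Set.update]
  | cons p l ih =>
    simp only [List.foldl_cons, List.map_cons, PySem.Set.update_cons]
    rw [ih, keys_collideStep]

-- A's result, in closed form: the deduped colliding keys, mapped to their groups
lemma A_closed (xs : List String) :
    get_collision_item xs =
      ((PySem.Set.ofList xs).filter (fun k => decide ((groupOf xs k).length > 1))).map
        (groupOf xs) := by
  show (((PySem.List.enumerate xs 0).foldl collideStep PySem.Dict.empty).keys.filter
      (fun k => (((PySem.List.enumerate xs 0).foldl collideStep PySem.Dict.empty).getD k []).length > 1)).map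
    (fun k => ((PySem.List.enumerate xs 0).foldl collideStep PySem.Dict.empty).getD k []) =
    ((PySem.Set.ofList xs).filter (fun k => decide ((groupOf xs k).length > 1))).map (groupOf xs)
  have hk : ((PySem.List.enumerate xs 0).foldl collideStep PySem.Dict.empty).keys
      = PySem.Set.ofList xs := by
    rw [keys_collide_fold, PySem.Dict.keys_empty, PySem.Set.update_nil_left,
      PySem.List.map_snd_enumerate]
  simp only [getD_collide_fold, PySem.Dict.getD_empty, List.nil_append, hk]
  rfl

-- B side: the i-th group is the group of the i-th string
lemma firstGroup_eq_groupOf (xs : List String) (i : Int) :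
    firstGroup xs i = groupOf xs (PySem.List.pyGetD xs i "") := by
  unfold firstGroup groupOf
  rw [PySem.List.enumerate_eq_map_pyRange xs "", List.filter_map, List.map_map]
  simp [Function.comp_def]

-- mapping xs[i] over the first-occurrence positions yields the ordered dedup of xs
lemma firstOcc_map (xs : List String) :
    ((PySem.List.pyRange 0 xs.length 1).filter
        (fun i => !((PySem.List.slice xs none (some i)).contains (PySem.List.pyGetD xs i "")))).map
      (fun i => PySem.List.pyGetD xs i "") = PySem.Set.ofList xs := by
  induction xs using List.reverseRecOn with
  | nil => rfl
  | append_singleton xs x ih =>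
    have hlen : ((xs ++ [x]).length : Int) = (xs.length : Int) + 1 := by
      push_cast [List.length_append, List.length_cons, List.length_nil]; omega
    rw [hlen, PySem.List.pyRange_one_succ_right (by positivity), List.filter_append,
      List.map_append, PySem.Set.ofList_append_singleton]
    have hsame : ∀ i ∈ PySem.List.pyRange 0 (xs.length : Int) 1,
        PySem.List.slice (xs ++ [x]) none (some i) = PySem.List.slice xs none (some i) ∧
        PySem.List.pyGetD (xs ++ [x]) i "" = PySem.List.pyGetD xs i "" := by
      intro i hi
      obtain ⟨h0, hlt⟩ := (PySem.List.mem_pyRange_one).mp hi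
      refine ⟨?_, ?_⟩
      · rw [PySem.List.slice_to (xs ++ [x]) h0, PySem.List.slice_to xs h0]
        exact List.take_append_of_le_length (by omega)
      · rw [PySem.List.pyGetD_eq_getElem (xs ++ [x]) "" h0 (by omega),
          PySem.List.pyGetD_eq_getElem xs "" h0 hlt]
        exact List.getElem_append_left (by omega)
    have hfilter : ((PySem.List.pyRange 0 (xs.length : Int) 1).filter
          (fun i => !((PySem.List.slice (xs ++ [x]) none (some i)).contains
            (PySem.List.pyGetD (xs ++ [x]) i "")))) =
        ((PySem.List.pyRange 0 (xs.length : Int) 1).filter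
          (fun i => !((PySem.List.slice xs none (some i)).contains
            (PySem.List.pyGetD xs i "")))) := by
      apply List.filter_congr
      intro i hi
      rw [(hsame i hi).1, (hsame i hi).2]
    rw [hfilter]
    have hmap : ∀ l : List Int, (∀ i ∈ l, i ∈ PySem.List.pyRange 0 (xs.length : Int) 1) →
        l.map (fun i => PySem.List.pyGetD (xs ++ [x]) i "") =
        l.map (fun i => PySem.List.pyGetD xs i "") := by
      intro l hl
      apply List.map_congr_left
      intro i hi
      exact (hsame i (hl i hi)).2
    rw [hmap _ (fun i hi => List.mem_of_mem_filter hi), ih]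
    -- the last position: kept iff x is new
    have hslice : PySem.List.slice (xs ++ [x]) none (some (xs.length : Int)) = xs := by
      rw [PySem.List.slice_to (xs ++ [x]) (by positivity)]
      simp
    have hget : PySem.List.pyGetD (xs ++ [x]) (xs.length : Int) "" = x := by
      rw [PySem.List.pyGetD_eq_getElem (xs ++ [x]) "" (by positivity) (by omega)]
      simp
    by_cases hm : x ∈ xs
    · rw [PySem.Set.add_of_mem (by simpa [PySem.Set.mem_ofList] using hm)]
      simp [hslice, hget, hm]
    · rw [PySem.Set.add_of_not_mem (by simpa [PySem.Set.mem_ofList] using hm)]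
      simp [hslice, hget, hm]

-- ===== VERDICT (by name: the statement is the Claim_ definition above) =====
theorem get_collision_item_spec : Claim_equal_get_collision_item := by
  intro xs _
  unfold Spec_get_collision_item
  rw [A_closed]
  show ((PySem.Set.ofList xs).filter (fun k => decide ((groupOf xs k).length > 1))).map (groupOf xs)
    = (PySem.List.pyRange 0 (PySem.List.len xs) 1).foldl
      (fun groups i =>
        if (PySem.List.slice xs none (some i)).contains (PySem.List.pyGetD xs i "") then groups
        else
          let positions := firstGroup xs i
          if positions.length > 1 then groups ++ [positions] else groups) []
  -- fuse B's 'continue' and the size test into one filter condition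
  have hstep : (PySem.List.pyRange 0 (PySem.List.len xs) 1).foldl
      (fun groups i =>
        if (PySem.List.slice xs none (some i)).contains (PySem.List.pyGetD xs i "") then groups
        else
          let positions := firstGroup xs i
          if positions.length > 1 then groups ++ [positions] else groups) [] =
    (PySem.List.pyRange 0 (PySem.List.len xs) 1).foldl
      (fun groups i =>
        if (!((PySem.List.slice xs none (some i)).contains (PySem.List.pyGetD xs i "")) &&
            decide ((firstGroup xs i).length > 1))
        then groups ++ [firstGroup xs i] else groups) [] := by
    apply PySem.List.foldl_congr_mem
    intro acc i _
    by_cases hm : PySem.List.pyGetD xs i "" ∈ PySem.List.slice xs none (some i)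
    · simp [hm]
    · by_cases hl : (firstGroup xs i).length > 1 <;> simp [hm, hl]
  rw [hstep, PySem.List.foldl_append_if, List.nil_append]
  have hff : (PySem.List.pyRange 0 (PySem.List.len xs) 1).filter
      (fun i => !((PySem.List.slice xs none (some i)).contains (PySem.List.pyGetD xs i "")) &&
        decide ((firstGroup xs i).length > 1)) =
    ((PySem.List.pyRange 0 (PySem.List.len xs) 1).filter
      (fun i => !((PySem.List.slice xs none (some i)).contains (PySem.List.pyGetD xs i "")))).filter
      (fun i => decide ((groupOf xs (PySem.List.pyGetD xs i "")).length > 1)) := by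
    rw [List.filter_filter]
    apply List.filter_congr
    intro i _
    rw [firstGroup_eq_groupOf]
    exact Bool.and_comm _ _
  rw [hff]
  have hmapg : ∀ l : List Int,
      l.map (firstGroup xs) = (l.map (fun i => PySem.List.pyGetD xs i "")).map (groupOf xs) := by
    intro l
    rw [List.map_map]
    apply List.map_congr_left
    intro i _
    exact firstGroup_eq_groupOf xs i
  rw [hmapg]
  have hcomp : (fun i => decide ((groupOf xs (PySem.List.pyGetD xs i "")).length > 1)) =
      (fun k => decide ((groupOf xs k).length > 1)) ∘ (fun i => PySem.List.pyGetD xs i "") := rfl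
  rw [hcomp, ← List.filter_map]
  have hlen : PySem.List.len xs = (xs.length : Int) := PySem.List.len_eq xs
  rw [hlen, firstOcc_map]
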